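-- pv_equiv track=rewrite | github.com/kanonnon/prokiso | exhard/exhard-percolation-option-62101046.py | flow
-- ===== SOURCE A (Python) =====
-- def _flow(isOpen, isFull, i, j):
--     """
--     引数：isOpen: list[list[bool]], i: int, j: int
--     返値：None
--     """
--
--     # isOpen行列の、行列の大きさを取得する
--     n = len(isOpen)
--
--     # iとjの境界条件を満たさないならreturn
--     if not (0 <= i < n and 0 <= j < n):
--         return
--
--     # isOpen[i][j]がOpenでないならreturn
--     if isOpen[i][j] == False:
--         return
--
--     # isFull[i][j]がFullならreturn
--     if isFull[i][j] == True:
--         return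
--
--     # isFull[i][j]をTrueに設定
--     isFull[i][j] = True
--
--     # site[i+1][j], site[i][j+1], site[i][j-1], site[i-1][j]に対して_flowを呼び出す
--     _flow(isOpen, isFull, i+1, j)
--     _flow(isOpen, isFull, i, j+1)
--     _flow(isOpen, isFull, i, j-1)
--     _flow(isOpen, isFull, i-1, j)
--
-- def flow(isOpen):
--     """
--     引数：isOpen: list[list[bool]]
--     返値：list[list[bool]]
--     """
--     # isOpen行列の、行列の大きさを取得する
--     n = len(isOpen)
--
--     # isFull行列を初期化する
--     isFull = []
--     for i in range(n):
--         isFull.append([False] * n)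
--
--     # 最上部のsiteすべてについて、_flowを呼び出す
--     for i in range(n):
--         _flow(isOpen, isFull, 0, i)
--
--     # isFullをreturn
--     return isFull
-- ===== SOURCE B (Python) =====
-- def flow(isOpen):
--     n = len(isOpen)
--     isFull = [[False] * n for _ in range(n)]
--     stack = [(0, c) for c in range(n)]
--     while stack:
--         i, j = stack.pop()
--         if not (0 <= i < n and 0 <= j < n):
--             continue
--         if not isOpen[i][j]:
--             continue
--         if isFull[i][j]:
--             continue
--         isFull[i][j] = True
--         stack.append((i + 1, j))
--         stack.append((i, j + 1))
--         stack.append((i, j - 1))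
--         stack.append((i - 1, j))
--     return isFull
-- ===== Notes on version B (the rewrite author's own statement) =====
-- stated objective: idiomatic
-- what changed: Replaces the recursive four-way flood-fill helper with a single iterative loop over an explicit worklist stack seeded with the whole top row (no helper function, no recursion, no Python recursion-depth limit).
import Mathlib
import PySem

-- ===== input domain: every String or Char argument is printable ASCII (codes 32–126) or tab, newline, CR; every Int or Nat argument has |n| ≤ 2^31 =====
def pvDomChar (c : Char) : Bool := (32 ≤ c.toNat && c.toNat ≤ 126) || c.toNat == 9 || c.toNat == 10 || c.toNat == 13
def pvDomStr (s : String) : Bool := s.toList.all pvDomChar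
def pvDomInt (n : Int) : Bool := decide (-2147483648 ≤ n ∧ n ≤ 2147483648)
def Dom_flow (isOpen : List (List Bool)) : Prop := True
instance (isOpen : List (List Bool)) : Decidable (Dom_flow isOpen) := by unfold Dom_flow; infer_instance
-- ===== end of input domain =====

-- B replaces A's recursive flood-fill helper by an iterative explicit-stack loop (idiomatic,
-- no recursion); equivalence of the RETURN value is proved on grids whose rows have length ≥ len(isOpen).

-- ===== PORT A =====
-- isOpen[i][j] (only evaluated under the 0 ≤ i,j < n guard; exact on Pre_, where rows are long enough)
def openAt (isOpen : List (List Bool)) (i j : Int) : Bool :=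
  ((PySem.List.pyGet? ((PySem.List.pyGet? isOpen i).getD []) j).getD false)

-- isFull[i][j] read (isFull is always an n×n grid; indices guarded non-negative at every use)
def gridGet (F : List (List Bool)) (i j : Int) : Bool :=
  if 0 ≤ i ∧ 0 ≤ j then ((F.getD i.toNat []).getD j.toNat false) else false

-- isFull[i][j] = True (indices guarded in-bounds at every use)
def markCell (F : List (List Bool)) (i j : Int) : List (List Bool) :=
  F.set i.toNat ((F.getD i.toNat []).set j.toNat true)

-- _flow: the recursive helper; fuel only makes the recursion structural (n*n+1 is always enough,
-- proved below), it changes no computed value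
def flowAuxA (isOpen : List (List Bool)) (fuel : Nat) (F : List (List Bool)) (i j : Int) :
    List (List Bool) :=
  match fuel with
  | 0 => F
  | fuel + 1 =>
    let n : Int := isOpen.length
    if ¬(0 ≤ i ∧ i < n ∧ 0 ≤ j ∧ j < n) then F
    else if openAt isOpen i j = false then F
    else if gridGet F i j = true then F
    else
      let F0 := markCell F i j
      let F1 := flowAuxA isOpen fuel F0 (i + 1) j
      let F2 := flowAuxA isOpen fuel F1 i (j + 1)
      let F3 := flowAuxA isOpen fuel F2 i (j - 1)
      flowAuxA isOpen fuel F3 (i - 1) j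

def flow (isOpen : List (List Bool)) : List (List Bool) :=
  let n := isOpen.length
  let F := (List.range n).foldl (fun acc _ => acc ++ [List.replicate n false]) []
  (List.range n).foldl (fun acc (c : Nat) => flowAuxA isOpen (n * n + 1) acc 0 (c : Int)) F

-- ===== PORT B =====
-- the while-loop over the explicit stack; head of the list = top of the Python stack
-- (stack.pop() pops the head, the four appends push in reverse on the head); fuel n+5n²+1 is
-- always enough (proved below), it changes no computed value
def flowLoop (isOpen : List (List Bool)) (fuel : Nat) (F : List (List Bool))
    (S : List (Int × Int)) : List (List Bool) :=
  match fuel, S with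
  | _, [] => F
  | 0, _ => F
  | fuel + 1, (i, j) :: rest =>
    let n : Int := isOpen.length
    if ¬(0 ≤ i ∧ i < n ∧ 0 ≤ j ∧ j < n) then flowLoop isOpen fuel F rest
    else if openAt isOpen i j = false then flowLoop isOpen fuel F rest
    else if gridGet F i j = true then flowLoop isOpen fuel F rest
    else flowLoop isOpen fuel (markCell F i j)
      ([(i - 1, j), (i, j - 1), (i, j + 1), (i + 1, j)] ++ rest)

def flow_alt (isOpen : List (List Bool)) : List (List Bool) :=
  let n := isOpen.length
  let F := List.replicate n (List.replicate n false)
  let S := ((List.range n).map (fun (c : Nat) => ((0 : Int), (c : Int)))).reverse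
  flowLoop isOpen (n + 5 * (n * n) + 1) F S

-- ===== PRECONDITION & SPEC =====
-- Pre_ excludes ragged grids (a row shorter than len(isOpen)): on those the fill raises
-- IndexError in both programs whenever it reaches a short row; on the ragged grids where the
-- fill never reaches a short row A still returns, and both programs return the same value there
-- (see the cite), so only potential-crash shapes are excluded.
def Pre_flow (isOpen : List (List Bool)) : Prop :=
  ∀ r ∈ isOpen, isOpen.length ≤ r.length
instance (isOpen : List (List Bool)) : Decidable (Pre_flow isOpen) := by
  unfold Pre_flow; infer_instance

def pvWitness_flow : List (List Bool) := [[true, false], [true, true]]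

def Spec_flow (isOpen : List (List Bool)) (out : List (List Bool)) : Prop := out = flow_alt isOpen
instance (isOpen : List (List Bool)) (out : List (List Bool)) : Decidable (Spec_flow isOpen out) := by
  unfold Spec_flow; infer_instance

-- ===== CLAIM (what is proved, stated in full; the proofs are below) =====
def Claim_equal_flow : Prop :=
  ∀ (isOpen : List (List Bool)), Dom_flow isOpen → Pre_flow isOpen →
    Spec_flow isOpen (flow isOpen)

-- ===== LEMMAS AND PROOFS =====

-- in-bounds predicate, adjacency, reachability from the top row through open cells
def InbP (n i j : Int) : Prop := 0 ≤ i ∧ i < n ∧ 0 ≤ j ∧ j < n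

def AdjTo (i j i' j' : Int) : Prop :=
  (i' = i + 1 ∧ j' = j) ∨ (i' = i ∧ j' = j + 1) ∨ (i' = i ∧ j' = j - 1) ∨ (i' = i - 1 ∧ j' = j)

inductive Rch (isOpen : List (List Bool)) : Int → Int → Prop where
  | top (j : Int) : InbP isOpen.length 0 j → openAt isOpen 0 j = true → Rch isOpen 0 j
  | step (i j i' j' : Int) : Rch isOpen i j → AdjTo i j i' j' →
      InbP isOpen.length i' j' → openAt isOpen i' j' = true → Rch isOpen i' j'

def Shape (n : Nat) (F : List (List Bool)) : Prop :=
  F.length = n ∧ ∀ r ∈ F, r.length = n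

def countFalse (F : List (List Bool)) : Nat := (F.map (fun r => r.count false)).sum

-- ---- basic grid lemmas ----
theorem getD_set_self {α : Type} (l : List α) (k : Nat) (x d : α) (h : k < l.length) :
    (l.set k x).getD k d = x := by
  rw [List.getD_eq_getElem?_getD, List.getElem?_set_self (by simpa using h)]; rfl

theorem getD_set_ne {α : Type} (l : List α) (k m : Nat) (x d : α) (h : k ≠ m) :
    (l.set k x).getD m d = l.getD m d := by
  rw [List.getD_eq_getElem?_getD, List.getElem?_set_ne h, ← List.getD_eq_getElem?_getD]

theorem getD_eq_getElem' {α : Type} (l : List α) (k : Nat) (d : α) (h : k < l.length) :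
    l.getD k d = l[k] := by
  rw [List.getD_eq_getElem?_getD, List.getElem?_eq_getElem h]; rfl

theorem getD_eq_default' {α : Type} (l : List α) (k : Nat) (d : α) (h : l.length ≤ k) :
    l.getD k d = d := by
  rw [List.getD_eq_getElem?_getD, List.getElem?_eq_none h]; rfl

theorem sum_set_nat (l : List Nat) (k : Nat) (x : Nat) (h : k < l.length) :
    (l.set k x).sum + l[k] = l.sum + x := by
  induction l generalizing k with
  | nil => simp at h
  | cons a t ih =>
    cases k with
    | zero =>
      simp only [List.set, List.sum_cons, List.getElem_cons_zero]
      omega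
    | succ k =>
      simp only [List.set, List.sum_cons, List.getElem_cons_succ]
      have := ih k (by simpa using h)
      omega

theorem count_set_true_le (r : List Bool) (k : Nat) :
    (r.set k true).count false ≤ r.count false := by
  induction r generalizing k with
  | nil => simp
  | cons a t ih =>
    cases k with
    | zero => simp [List.count_cons]
    | succ k =>
      simp only [List.set, List.count_cons]
      have := ih k
      omega

theorem count_set_false (r : List Bool) (k : Nat) (h : k < r.length) (hv : r[k] = false) :
    (r.set k true).count false + 1 = r.count false := by
  induction r generalizing k with
  | nil => simp at h
  | cons a t ih =>
    cases k with
    | zero => simp_all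
    | succ k =>
      simp only [List.set, List.count_cons]
      have := ih k (by simpa using h) (by simpa using hv)
      omega

theorem shape_mark (n : Nat) (F : List (List Bool)) (i j : Int) (hs : Shape n F) :
    Shape n (markCell F i j) := by
  obtain ⟨hF, hr⟩ := hs
  by_cases hi : i.toNat < F.length
  · refine ⟨by simpa [markCell] using hF, ?_⟩
    intro r hrm
    rcases List.mem_or_eq_of_mem_set hrm with h | h
    · exact hr _ h
    · subst h
      rw [getD_eq_getElem' _ _ _ hi, List.length_set]
      exact hr _ (List.getElem_mem hi)
  · have : markCell F i j = F := List.set_eq_of_length_le (by omega)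
    rw [this]
    exact ⟨hF, hr⟩

theorem get_mark_self (n : Nat) (F : List (List Bool)) (i j : Int) (hs : Shape n F)
    (hb : InbP (n : Int) i j) : gridGet (markCell F i j) i j = true := by
  obtain ⟨hF, hr⟩ := hs
  obtain ⟨h1, h2, h3, h4⟩ := hb
  have hi : i.toNat < F.length := by omega
  have hj : j.toNat < (F.getD i.toNat []).length := by
    rw [getD_eq_getElem' _ _ _ hi, hr _ (List.getElem_mem hi)]
    omega
  unfold gridGet markCell
  rw [if_pos ⟨h1, h3⟩, getD_set_self _ _ _ _ hi, getD_set_self _ _ _ _ hj]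

theorem get_mark_mono (F : List (List Bool)) (i j a b : Int)
    (h : gridGet F a b = true) : gridGet (markCell F i j) a b = true := by
  unfold gridGet at h ⊢
  split at h
  · rename_i hg
    rw [if_pos hg]
    have ha : a.toNat < F.length := by
      by_contra hlt
      have hnil : F.getD a.toNat [] = ([] : List Bool) := getD_eq_default' _ _ _ (by omega)
      rw [hnil] at h
      simp at h
    have hb' : b.toNat < (F.getD a.toNat []).length := by
      by_contra hlt
      rw [getD_eq_default' _ _ _ (by omega)] at h
      simp at h
    unfold markCell
    by_cases hia : i.toNat = a.toNat
    · rw [hia, getD_set_self _ _ _ _ ha]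
      by_cases hjb : j.toNat = b.toNat
      · rw [hjb, getD_set_self _ _ _ _ hb']
      · rw [getD_set_ne _ _ _ _ _ hjb]
        exact h
    · rw [getD_set_ne _ _ _ _ _ hia]
      exact h
  · exact absurd h (by simp)

theorem get_mark_le (F : List (List Bool)) (i j a b : Int) (hi : 0 ≤ i) (hj : 0 ≤ j)
    (h : gridGet (markCell F i j) a b = true) :
    gridGet F a b = true ∨ (a = i ∧ b = j) := by
  unfold gridGet at h ⊢
  split at h
  · rename_i hg
    rw [if_pos hg]
    unfold markCell at h
    by_cases hia : i.toNat = a.toNat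
    · by_cases hib : i.toNat < F.length
      · rw [hia, getD_set_self _ _ _ _ (by omega)] at h
        by_cases hjb : j.toNat = b.toNat
        · right
          constructor <;> omega
        · left
          rw [getD_set_ne _ _ _ _ _ hjb] at h
          exact h
      · left
        rw [List.set_eq_of_length_le (by omega)] at h
        exact h
    · left
      rw [getD_set_ne _ _ _ _ _ hia] at h
      exact h
  · exact absurd h (by simp)

-- ---- counting lemmas ----
theorem count_mark_le (F : List (List Bool)) (i j : Int) :
    countFalse (markCell F i j) ≤ countFalse F := by
  by_cases hi : i.toNat < F.length
  · unfold countFalse markCell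
    rw [List.map_set]
    have hsum := sum_set_nat (F.map (fun r => r.count false)) i.toNat
      (((F.getD i.toNat []).set j.toNat true).count false) (by simpa using hi)
    have hget : (F.map (fun r => r.count false))[i.toNat]'(by simpa using hi)
        = F[i.toNat].count false := by simp
    have hle : ((F.getD i.toNat []).set j.toNat true).count false ≤ F[i.toNat].count false := by
      rw [getD_eq_getElem' _ _ _ hi]
      exact count_set_true_le _ _
    omega
  · rw [show markCell F i j = F from List.set_eq_of_length_le (by omega)]

theorem count_mark_lt (n : Nat) (F : List (List Bool)) (i j : Int) (hs : Shape n F)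
    (hb : InbP (n : Int) i j) (h : gridGet F i j = false) :
    countFalse (markCell F i j) + 1 ≤ countFalse F := by
  obtain ⟨hF, hr⟩ := hs
  obtain ⟨h1, h2, h3, h4⟩ := hb
  have hi : i.toNat < F.length := by omega
  have hj : j.toNat < F[i.toNat].length := by
    rw [hr _ (List.getElem_mem hi)]; omega
  have hv : F[i.toNat][j.toNat] = false := by
    unfold gridGet at h
    rw [if_pos ⟨h1, h3⟩, getD_eq_getElem' _ _ _ hi, getD_eq_getElem' _ _ _ hj] at h
    exact h
  unfold countFalse markCell
  rw [List.map_set]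
  have hsum := sum_set_nat (F.map (fun r => r.count false)) i.toNat
    (((F.getD i.toNat []).set j.toNat true).count false) (by simpa using hi)
  have hget : (F.map (fun r => r.count false))[i.toNat]'(by simpa using hi)
      = F[i.toNat].count false := by simp
  have hcnt : ((F.getD i.toNat []).set j.toNat true).count false + 1
      = F[i.toNat].count false := by
    rw [getD_eq_getElem' _ _ _ hi]
    exact count_set_false _ _ hj hv
  omega

theorem count_le_total (n : Nat) (F : List (List Bool)) (hs : Shape n F) :
    countFalse F ≤ n * n := by
  obtain ⟨hF, hr⟩ := hs
  unfold countFalse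
  have := List.sum_le_card_nsmul (F.map (fun r => r.count false)) n (by
    intro x hx
    obtain ⟨r, hrm, rfl⟩ := List.mem_map.mp hx
    calc r.count false ≤ r.length := List.count_le_length
      _ = n := hr _ hrm)
  simpa [hF, Nat.mul_comm] using this

-- ---- soundness / closedness notions ----
def SoundF (isOpen F : List (List Bool)) : Prop :=
  ∀ a b, gridGet F a b = true → Rch isOpen a b

def ClosedAt (isOpen F : List (List Bool)) (a b : Int) : Prop :=
  ∀ a' b', AdjTo a b a' b' → InbP (isOpen.length : Int) a' b' →
    openAt isOpen a' b' = true → gridGet F a' b' = true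

def ClosedAll (isOpen F : List (List Bool)) : Prop :=
  ∀ a b, gridGet F a b = true → ClosedAt isOpen F a b

theorem closedAt_mono (isOpen F G : List (List Bool)) (a b : Int)
    (h : ClosedAt isOpen F a b) (hm : ∀ x y, gridGet F x y = true → gridGet G x y = true) :
    ClosedAt isOpen G a b := fun a' b' h1 h2 h3 => hm _ _ (h a' b' h1 h2 h3)

-- ---- lemmas about A's recursive fill ----
theorem flowAuxA_shape (isOpen : List (List Bool)) (f : Nat) (F : List (List Bool)) (i j : Int)
    (hs : Shape isOpen.length F) : Shape isOpen.length (flowAuxA isOpen f F i j) := by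
  induction f generalizing F i j with
  | zero => simpa [flowAuxA] using hs
  | succ f ih =>
    simp only [flowAuxA]
    split_ifs with h1 h2 h3
    · exact hs
    · exact hs
    · exact ih _ _ _ (ih _ _ _ (ih _ _ _ (ih _ _ _ (shape_mark _ _ _ _ hs))))
    · exact hs

theorem flowAuxA_mono (isOpen : List (List Bool)) (f : Nat) (F : List (List Bool)) (i j a b : Int)
    (h : gridGet F a b = true) : gridGet (flowAuxA isOpen f F i j) a b = true := by
  induction f generalizing F i j with
  | zero => simpa [flowAuxA] using h
  | succ f ih =>
    simp only [flowAuxA]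
    split_ifs with h1 h2 h3
    · exact h
    · exact h
    · exact ih _ _ _ (ih _ _ _ (ih _ _ _ (ih _ _ _ (get_mark_mono _ _ _ _ _ h))))
    · exact h

theorem flowAuxA_count (isOpen : List (List Bool)) (f : Nat) (F : List (List Bool)) (i j : Int) :
    countFalse (flowAuxA isOpen f F i j) ≤ countFalse F := by
  induction f generalizing F i j with
  | zero => simp [flowAuxA]
  | succ f ih =>
    simp only [flowAuxA]
    split_ifs with h1 h2 h3
    · exact le_refl _
    · exact le_refl _
    · calc countFalse _ ≤ countFalse (flowAuxA isOpen f (flowAuxA isOpen f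
            (flowAuxA isOpen f (markCell F i j) (i+1) j) i (j+1)) i (j-1)) := ih _ _ _
        _ ≤ countFalse (flowAuxA isOpen f (flowAuxA isOpen f (markCell F i j) (i+1) j) i (j+1)) := ih _ _ _
        _ ≤ countFalse (flowAuxA isOpen f (markCell F i j) (i+1) j) := ih _ _ _
        _ ≤ countFalse (markCell F i j) := ih _ _ _
        _ ≤ countFalse F := count_mark_le _ _ _
    · exact le_refl _

theorem flowAuxA_sound (isOpen : List (List Bool)) (f : Nat) (F : List (List Bool)) (i j : Int)
    (hF : SoundF isOpen F)
    (hp : InbP (isOpen.length : Int) i j → openAt isOpen i j = true → Rch isOpen i j) :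
    SoundF isOpen (flowAuxA isOpen f F i j) := by
  induction f generalizing F i j with
  | zero => simpa [flowAuxA] using hF
  | succ f ih =>
    simp only [flowAuxA]
    split_ifs with h1 h2 h3
    · exact hF
    · exact hF
    · have hinb : InbP (isOpen.length : Int) i j := h1
      have hopen : openAt isOpen i j = true := by
        cases hv : openAt isOpen i j
        · exact absurd hv h2
        · rfl
      have hRp : Rch isOpen i j := hp hinb hopen
      have hF0 : SoundF isOpen (markCell F i j) := by
        intro a b hg
        rcases get_mark_le F i j a b hinb.1 hinb.2.2.1 hg with h | ⟨rfl, rfl⟩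
        · exact hF _ _ h
        · exact hRp
      exact ih _ (i-1) j
        (ih _ i (j-1)
          (ih _ i (j+1)
            (ih _ (i+1) j hF0
              (fun hb ho => Rch.step i j _ _ hRp (Or.inl ⟨rfl, rfl⟩) hb ho))
            (fun hb ho => Rch.step i j _ _ hRp (Or.inr (Or.inl ⟨rfl, rfl⟩)) hb ho))
          (fun hb ho => Rch.step i j _ _ hRp (Or.inr (Or.inr (Or.inl ⟨rfl, rfl⟩))) hb ho))
        (fun hb ho => Rch.step i j _ _ hRp (Or.inr (Or.inr (Or.inr ⟨rfl, rfl⟩))) hb ho)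
    · exact hF

theorem flowAuxA_marks (isOpen : List (List Bool)) (f : Nat) (F : List (List Bool)) (i j : Int)
    (hf : 1 ≤ f) (hs : Shape isOpen.length F) (hinb : InbP (isOpen.length : Int) i j)
    (hopen : openAt isOpen i j = true) :
    gridGet (flowAuxA isOpen f F i j) i j = true := by
  cases f with
  | zero => omega
  | succ f =>
    simp only [flowAuxA]
    split_ifs with h1 h2 h3
    · exact absurd hopen (by simp [h2])
    · exact h3
    · exact flowAuxA_mono _ _ _ _ _ _ _ (flowAuxA_mono _ _ _ _ _ _ _
        (flowAuxA_mono _ _ _ _ _ _ _ (flowAuxA_mono _ _ _ _ _ _ _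
          (get_mark_self _ _ _ _ hs hinb))))
    · exact absurd hinb h1

theorem flowAuxA_closed (isOpen : List (List Bool)) (f : Nat) :
    ∀ (F : List (List Bool)) (i j : Int), countFalse F + 1 ≤ f → Shape isOpen.length F →
    ∀ a b, gridGet (flowAuxA isOpen f F i j) a b = true →
      gridGet F a b = true ∨ ClosedAt isOpen (flowAuxA isOpen f F i j) a b := by
  induction f with
  | zero => intro F i j hf; omega
  | succ f ih =>
    intro F i j hf hs a b hR
    simp only [flowAuxA] at hR ⊢
    split_ifs at hR ⊢ with h1 h2 h3
    · exact Or.inl hR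
    · exact Or.inl hR
    · have hinb : InbP (isOpen.length : Int) i j := h1
      have hfresh : gridGet F i j = false := by
        cases hv : gridGet F i j
        · rfl
        · exact absurd hv h3
      have hc0 : countFalse (markCell F i j) + 1 ≤ countFalse F :=
        count_mark_lt _ _ _ _ hs hinb hfresh
      have s0 : Shape isOpen.length (markCell F i j) := shape_mark _ _ _ _ hs
      have s1 := flowAuxA_shape isOpen f _ (i+1) j s0
      have s2 := flowAuxA_shape isOpen f _ i (j+1) s1
      have s3 := flowAuxA_shape isOpen f _ i (j-1) s2
      have hc1 := flowAuxA_count isOpen f (markCell F i j) (i+1) j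
      have hc2 := flowAuxA_count isOpen f (flowAuxA isOpen f (markCell F i j) (i+1) j) i (j+1)
      have hc3 := flowAuxA_count isOpen f (flowAuxA isOpen f (flowAuxA isOpen f
        (markCell F i j) (i+1) j) i (j+1)) i (j-1)
      by_cases hab : gridGet F a b = true
      · exact Or.inl hab
      right
      by_cases hij : a = i ∧ b = j
      · obtain ⟨rfl, rfl⟩ := hij
        intro a' b' hadj hinb' hopen'
        rcases hadj with ⟨rfl, rfl⟩ | ⟨rfl, rfl⟩ | ⟨rfl, rfl⟩ | ⟨rfl, rfl⟩
        · exact flowAuxA_mono _ _ _ _ _ _ _ (flowAuxA_mono _ _ _ _ _ _ _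
            (flowAuxA_mono _ _ _ _ _ _ _
              (flowAuxA_marks isOpen f _ _ _ (by omega) s0 hinb' hopen')))
        · exact flowAuxA_mono _ _ _ _ _ _ _ (flowAuxA_mono _ _ _ _ _ _ _
            (flowAuxA_marks isOpen f _ _ _ (by omega) s1 hinb' hopen'))
        · exact flowAuxA_mono _ _ _ _ _ _ _
            (flowAuxA_marks isOpen f _ _ _ (by omega) s2 hinb' hopen')
        · exact flowAuxA_marks isOpen f _ _ _ (by omega) s3 hinb' hopen'
      · rcases ih _ (i-1) j (by omega) s3 a b hR with h | hcl
        · rcases ih _ i (j-1) (by omega) s2 a b h with h | hcl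
          · rcases ih _ i (j+1) (by omega) s1 a b h with h | hcl
            · rcases ih _ (i+1) j (by omega) s0 a b h with h | hcl
              · rcases get_mark_le F i j a b hinb.1 hinb.2.2.1 h with h' | h'
                · exact absurd h' hab
                · exact absurd h' hij
              · exact closedAt_mono _ _ _ _ _ hcl (fun x y hx =>
                  flowAuxA_mono _ _ _ _ _ _ _ (flowAuxA_mono _ _ _ _ _ _ _
                    (flowAuxA_mono _ _ _ _ _ _ _ hx)))
            · exact closedAt_mono _ _ _ _ _ hcl (fun x y hx =>
                flowAuxA_mono _ _ _ _ _ _ _ (flowAuxA_mono _ _ _ _ _ _ _ hx))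
          · exact closedAt_mono _ _ _ _ _ hcl (fun x y hx => flowAuxA_mono _ _ _ _ _ _ _ hx)
        · exact hcl
    · exact Or.inl hR

-- ---- lemmas about B's worklist loop ----
def InvC (isOpen F : List (List Bool)) (S : List (Int × Int)) : Prop :=
  ∀ a b, gridGet F a b = true → ∀ a' b', AdjTo a b a' b' →
    InbP (isOpen.length : Int) a' b' → openAt isOpen a' b' = true →
    (gridGet F a' b' = true ∨ (a', b') ∈ S)

theorem flowLoop_shape (isOpen : List (List Bool)) (f : Nat) :
    ∀ (F : List (List Bool)) (S : List (Int × Int)), Shape isOpen.length F →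
    Shape isOpen.length (flowLoop isOpen f F S) := by
  induction f with
  | zero => intro F S hs; cases S <;> simpa [flowLoop] using hs
  | succ f ih =>
    intro F S hs
    cases S with
    | nil => simpa [flowLoop] using hs
    | cons p rest =>
      obtain ⟨i, j⟩ := p
      simp only [flowLoop]
      split_ifs with h1 h2 h3
      · exact ih _ _ hs
      · exact ih _ _ hs
      · exact ih _ _ (shape_mark _ _ _ _ hs)
      · exact ih _ _ hs

theorem flowLoop_mono (isOpen : List (List Bool)) (f : Nat) :
    ∀ (F : List (List Bool)) (S : List (Int × Int)) (a b : Int), gridGet F a b = true →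
    gridGet (flowLoop isOpen f F S) a b = true := by
  induction f with
  | zero => intro F S a b h; cases S <;> simpa [flowLoop] using h
  | succ f ih =>
    intro F S a b h
    cases S with
    | nil => simpa [flowLoop] using h
    | cons p rest =>
      obtain ⟨i, j⟩ := p
      simp only [flowLoop]
      split_ifs with h1 h2 h3
      · exact ih _ _ _ _ h
      · exact ih _ _ _ _ h
      · exact ih _ _ _ _ (get_mark_mono _ _ _ _ _ h)
      · exact ih _ _ _ _ h

theorem flowLoop_sound (isOpen : List (List Bool)) (f : Nat) :
    ∀ (F : List (List Bool)) (S : List (Int × Int)), SoundF isOpen F →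
    (∀ p ∈ S, InbP (isOpen.length : Int) p.1 p.2 → openAt isOpen p.1 p.2 = true →
      Rch isOpen p.1 p.2) →
    SoundF isOpen (flowLoop isOpen f F S) := by
  induction f with
  | zero => intro F S hF hS; cases S <;> simpa [flowLoop] using hF
  | succ f ih =>
    intro F S hF hS
    cases S with
    | nil => simpa [flowLoop] using hF
    | cons p rest =>
      obtain ⟨i, j⟩ := p
      simp only [flowLoop]
      have hrest : ∀ p ∈ rest, InbP (isOpen.length : Int) p.1 p.2 →
          openAt isOpen p.1 p.2 = true → Rch isOpen p.1 p.2 :=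
        fun p hp => hS p (List.mem_cons_of_mem _ hp)
      split_ifs with h1 h2 h3
      · exact ih _ _ hF hrest
      · exact ih _ _ hF hrest
      · have hinb : InbP (isOpen.length : Int) i j := h1
        have hopen : openAt isOpen i j = true := by
          cases hv : openAt isOpen i j
          · exact absurd hv h2
          · rfl
        have hRp : Rch isOpen i j := hS (i, j) List.mem_cons_self hinb hopen
        refine ih _ _ ?_ ?_
        · intro a b hg
          rcases get_mark_le F i j a b hinb.1 hinb.2.2.1 hg with h | ⟨rfl, rfl⟩
          · exact hF _ _ h
          · exact hRp
        · intro p hp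
          rcases List.mem_append.mp hp with hq | hq
          · fin_cases hq
            · exact fun hb ho => Rch.step i j _ _ hRp (Or.inr (Or.inr (Or.inr ⟨rfl, rfl⟩))) hb ho
            · exact fun hb ho => Rch.step i j _ _ hRp (Or.inr (Or.inr (Or.inl ⟨rfl, rfl⟩))) hb ho
            · exact fun hb ho => Rch.step i j _ _ hRp (Or.inr (Or.inl ⟨rfl, rfl⟩)) hb ho
            · exact fun hb ho => Rch.step i j _ _ hRp (Or.inl ⟨rfl, rfl⟩) hb ho
          · exact hrest p hq
      · exact ih _ _ hF hrest

theorem flowLoop_marks (isOpen : List (List Bool)) (f : Nat) :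
    ∀ (F : List (List Bool)) (S : List (Int × Int)),
    S.length + 5 * countFalse F + 1 ≤ f → Shape isOpen.length F →
    ∀ p ∈ S, InbP (isOpen.length : Int) p.1 p.2 → openAt isOpen p.1 p.2 = true →
    gridGet (flowLoop isOpen f F S) p.1 p.2 = true := by
  induction f with
  | zero => intro F S hf; omega
  | succ f ih =>
    intro F S hf hs p hp hinb' hopen'
    cases S with
    | nil => exact absurd hp (List.not_mem_nil)
    | cons q rest =>
      obtain ⟨i, j⟩ := q
      obtain ⟨pi, pj⟩ := p
      simp only [flowLoop]
      simp only [List.length_cons] at hf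
      split_ifs with h1 h2 h3
      · rcases List.mem_cons.mp hp with heq | hmem
        · obtain ⟨rfl, rfl⟩ := Prod.mk.injEq .. ▸ heq
          simp only at hinb' hopen'
          exact absurd hopen' (by simp_all)
        · exact ih _ _ (by omega) hs _ hmem hinb' hopen'
      · rcases List.mem_cons.mp hp with heq | hmem
        · obtain ⟨rfl, rfl⟩ := Prod.mk.injEq .. ▸ heq
          exact flowLoop_mono _ _ _ _ _ _ h3
        · exact ih _ _ (by omega) hs _ hmem hinb' hopen'
      · have hinb : InbP (isOpen.length : Int) i j := h1
        have hfresh : gridGet F i j = false := by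
          cases hv : gridGet F i j
          · rfl
          · exact absurd hv h3
        have hcnt : countFalse (markCell F i j) + 1 ≤ countFalse F :=
          count_mark_lt _ _ _ _ hs hinb hfresh
        have hs' : Shape isOpen.length (markCell F i j) := shape_mark _ _ _ _ hs
        rcases List.mem_cons.mp hp with heq | hmem
        · obtain ⟨rfl, rfl⟩ := Prod.mk.injEq .. ▸ heq
          exact flowLoop_mono _ _ _ _ _ _ (get_mark_self _ _ _ _ hs hinb)
        · refine ih _ _ ?_ hs' _ (List.mem_append.mpr (Or.inr hmem)) hinb' hopen'
          simp only [List.length_append, List.length_cons, List.length_nil]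
          omega
      · rcases List.mem_cons.mp hp with heq | hmem
        · obtain ⟨rfl, rfl⟩ := Prod.mk.injEq .. ▸ heq
          exact absurd hinb' h1
        · exact ih _ _ (by omega) hs _ hmem hinb' hopen'

theorem flowLoop_closed (isOpen : List (List Bool)) (f : Nat) :
    ∀ (F : List (List Bool)) (S : List (Int × Int)),
    S.length + 5 * countFalse F + 1 ≤ f → Shape isOpen.length F → InvC isOpen F S →
    ClosedAll isOpen (flowLoop isOpen f F S) := by
  induction f with
  | zero => intro F S hf; omega
  | succ f ih =>
    intro F S hf hs hInv
    cases S with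
    | nil =>
      intro a b hg a' b' hadj hinb' hopen'
      simp only [flowLoop] at hg ⊢
      rcases hInv a b hg a' b' hadj hinb' hopen' with h | h
      · exact h
      · exact absurd h (List.not_mem_nil)
    | cons q rest =>
      obtain ⟨i, j⟩ := q
      simp only [flowLoop]
      simp only [List.length_cons] at hf
      split_ifs with h1 h2 h3
      · refine ih _ _ (by omega) hs ?_
        intro a b hg a' b' hadj hinb' hopen'
        rcases hInv a b hg a' b' hadj hinb' hopen' with h | h
        · exact Or.inl h
        · rcases List.mem_cons.mp h with heq | hmem
          · obtain ⟨rfl, rfl⟩ := Prod.mk.injEq .. ▸ heq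
            exact absurd hopen' (by simp_all)
          · exact Or.inr hmem
      · refine ih _ _ (by omega) hs ?_
        intro a b hg a' b' hadj hinb' hopen'
        rcases hInv a b hg a' b' hadj hinb' hopen' with h | h
        · exact Or.inl h
        · rcases List.mem_cons.mp h with heq | hmem
          · obtain ⟨rfl, rfl⟩ := Prod.mk.injEq .. ▸ heq
            exact Or.inl h3
          · exact Or.inr hmem
      · have hinb : InbP (isOpen.length : Int) i j := h1
        have hfresh : gridGet F i j = false := by
          cases hv : gridGet F i j
          · rfl
          · exact absurd hv h3
        have hcnt : countFalse (markCell F i j) + 1 ≤ countFalse F :=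
          count_mark_lt _ _ _ _ hs hinb hfresh
        refine ih _ _ ?_ (shape_mark _ _ _ _ hs) ?_
        · simp only [List.length_append, List.length_cons, List.length_nil]
          omega
        · intro a b hg a' b' hadj hinb' hopen'
          rcases get_mark_le F i j a b hinb.1 hinb.2.2.1 hg with hFab | ⟨rfl, rfl⟩
          · rcases hInv a b hFab a' b' hadj hinb' hopen' with h | h
            · exact Or.inl (get_mark_mono _ _ _ _ _ h)
            · rcases List.mem_cons.mp h with heq | hmem
              · obtain ⟨rfl, rfl⟩ := Prod.mk.injEq .. ▸ heq
                exact Or.inl (get_mark_self _ _ _ _ hs hinb)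
              · exact Or.inr (List.mem_append.mpr (Or.inr hmem))
          · refine Or.inr (List.mem_append.mpr (Or.inl ?_))
            rcases hadj with ⟨rfl, rfl⟩ | ⟨rfl, rfl⟩ | ⟨rfl, rfl⟩ | ⟨rfl, rfl⟩ <;> simp
      · refine ih _ _ (by omega) hs ?_
        intro a b hg a' b' hadj hinb' hopen'
        rcases hInv a b hg a' b' hadj hinb' hopen' with h | h
        · exact Or.inl h
        · rcases List.mem_cons.mp h with heq | hmem
          · obtain ⟨rfl, rfl⟩ := Prod.mk.injEq .. ▸ heq
            exact absurd hinb' h1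
          · exact Or.inr hmem

-- ---- initial grid ----
theorem foldl_append_const (l : List Nat) (x : List Bool) :
    ∀ acc, l.foldl (fun a (_ : Nat) => a ++ [x]) acc = acc ++ List.replicate l.length x := by
  induction l with
  | nil => intro acc; simp
  | cons c t ih =>
    intro acc
    rw [List.foldl_cons, ih, List.append_assoc]
    simp [List.replicate_succ]

theorem shape_init (n : Nat) : Shape n (List.replicate n (List.replicate n false)) := by
  constructor
  · simp
  · intro r hr
    rw [List.eq_of_mem_replicate hr]
    simp

theorem get_init (n : Nat) (a b : Int) :
    gridGet (List.replicate n (List.replicate n false)) a b = false := by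
  unfold gridGet
  split
  · by_cases ha : a.toNat < n
    · have hrow : (List.replicate n (List.replicate n false)).getD a.toNat []
          = List.replicate n false := by
        rw [getD_eq_getElem' _ _ _ (by simpa using ha), List.getElem_replicate]
      rw [hrow]
      by_cases hb : b.toNat < n
      · rw [getD_eq_getElem' _ _ _ (by simpa using hb), List.getElem_replicate]
      · exact getD_eq_default' _ _ _ (by simpa using hb)
    · have hrow : (List.replicate n (List.replicate n false)).getD a.toNat []
          = ([] : List Bool) := getD_eq_default' _ _ _ (by simpa using ha)
      rw [hrow]
      rfl
  · rfl

theorem count_init (n : Nat) :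
    countFalse (List.replicate n (List.replicate n false)) = n * n := by
  unfold countFalse
  simp

-- ---- a closed sound grid containing the open top row is exactly the reach set ----
theorem rch_subset (isOpen T : List (List Bool)) (hclosed : ClosedAll isOpen T)
    (htops : ∀ j : Int, InbP (isOpen.length : Int) 0 j → openAt isOpen 0 j = true →
      gridGet T 0 j = true) :
    ∀ a b, Rch isOpen a b → gridGet T a b = true := by
  intro a b h
  induction h with
  | top j hb ho => exact htops j hb ho
  | step i j i' j' hr hadj hb ho ih => exact hclosed i j ih i' j' hadj hb ho

-- ---- characterization of A's result ----
theorem flow_char (isOpen : List (List Bool)) :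
    Shape isOpen.length (flow isOpen) ∧
    ∀ a b, (gridGet (flow isOpen) a b = true ↔ Rch isOpen a b) := by
  have hfold : ∀ (cs : List Nat) (F : List (List Bool)), Shape isOpen.length F →
      SoundF isOpen F → ClosedAll isOpen F →
      (Shape isOpen.length (cs.foldl (fun acc (c : Nat) =>
          flowAuxA isOpen (isOpen.length * isOpen.length + 1) acc 0 (c : Int)) F) ∧
       SoundF isOpen (cs.foldl (fun acc (c : Nat) =>
          flowAuxA isOpen (isOpen.length * isOpen.length + 1) acc 0 (c : Int)) F) ∧
       ClosedAll isOpen (cs.foldl (fun acc (c : Nat) =>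
          flowAuxA isOpen (isOpen.length * isOpen.length + 1) acc 0 (c : Int)) F) ∧
       (∀ a b, gridGet F a b = true → gridGet (cs.foldl (fun acc (c : Nat) =>
          flowAuxA isOpen (isOpen.length * isOpen.length + 1) acc 0 (c : Int)) F) a b = true) ∧
       (∀ c ∈ cs, InbP (isOpen.length : Int) 0 (c : Int) → openAt isOpen 0 (c : Int) = true →
          gridGet (cs.foldl (fun acc (c : Nat) =>
            flowAuxA isOpen (isOpen.length * isOpen.length + 1) acc 0 (c : Int)) F) 0 (c : Int) = true)) := by
    intro cs
    induction cs with
    | nil =>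
      intro F hs hsound hclosed
      exact ⟨hs, hsound, hclosed, fun a b h => h, by simp⟩
    | cons c cs ih =>
      intro F hs hsound hclosed
      have hfuel : countFalse F + 1 ≤ isOpen.length * isOpen.length + 1 := by
        have := count_le_total _ F hs
        omega
      have hs' := flowAuxA_shape isOpen (isOpen.length * isOpen.length + 1) F 0 (c : Int) hs
      have hsound' := flowAuxA_sound isOpen (isOpen.length * isOpen.length + 1) F 0 (c : Int) hsound
        (fun hb ho => Rch.top _ hb ho)
      have hclosed' : ClosedAll isOpen (flowAuxA isOpen
          (isOpen.length * isOpen.length + 1) F 0 (c : Int)) := by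
        intro a b hg
        rcases flowAuxA_closed isOpen (isOpen.length * isOpen.length + 1) F 0 (c : Int) hfuel hs a b hg with h | h
        · exact closedAt_mono _ _ _ _ _ (hclosed a b h)
            (fun x y hx => flowAuxA_mono _ _ _ _ _ _ _ hx)
        · exact h
      obtain ⟨S1, S2, S3, S4, S5⟩ := ih _ hs' hsound' hclosed'
      simp only [List.foldl_cons]
      refine ⟨S1, S2, S3, fun a b h => S4 _ _ (flowAuxA_mono _ _ _ _ _ _ _ h), ?_⟩
      intro c' hc'
      rcases List.mem_cons.mp hc' with rfl | hmem
      · intro hb ho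
        exact S4 _ _ (flowAuxA_marks isOpen (isOpen.length * isOpen.length + 1) F 0 (c' : Int) (by omega) hs hb ho)
      · exact S5 c' hmem
  have hinit : (List.range isOpen.length).foldl
      (fun acc _ => acc ++ [List.replicate isOpen.length false]) []
      = List.replicate isOpen.length (List.replicate isOpen.length false) := by
    rw [foldl_append_const]
    simp
  have hflow : flow isOpen = (List.range isOpen.length).foldl (fun acc (c : Nat) =>
      flowAuxA isOpen (isOpen.length * isOpen.length + 1) acc 0 (c : Int))
      (List.replicate isOpen.length (List.replicate isOpen.length false)) := by
    simp only [flow]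
    rw [hinit]
  obtain ⟨S1, S2, S3, S4, S5⟩ := hfold (List.range isOpen.length)
    (List.replicate isOpen.length (List.replicate isOpen.length false))
    (shape_init _)
    (fun a b h => absurd h (by simp [get_init]))
    (fun a b h => absurd h (by simp [get_init]))
  rw [hflow]
  refine ⟨S1, fun a b => ⟨fun h => S2 a b h, ?_⟩⟩
  intro h
  refine rch_subset isOpen _ S3 ?_ a b h
  intro j hb ho
  have hj : ((j.toNat : Nat) : Int) = j := by
    obtain ⟨_, _, h3, _⟩ := hb
    omega
  have := S5 j.toNat (List.mem_range.mpr (by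
    obtain ⟨_, _, h3, h4⟩ := hb
    omega))
  rw [hj] at this
  exact this hb ho

-- ---- characterization of B's result ----
theorem flow_alt_char (isOpen : List (List Bool)) :
    Shape isOpen.length (flow_alt isOpen) ∧
    ∀ a b, (gridGet (flow_alt isOpen) a b = true ↔ Rch isOpen a b) := by
  have hS : (((List.range isOpen.length).map
      (fun (c : Nat) => ((0 : Int), (c : Int)))).reverse).length = isOpen.length := by simp
  have hfuel : (((List.range isOpen.length).map
        (fun (c : Nat) => ((0 : Int), (c : Int)))).reverse).length
      + 5 * countFalse (List.replicate isOpen.length (List.replicate isOpen.length false)) + 1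
      ≤ isOpen.length + 5 * (isOpen.length * isOpen.length) + 1 := by
    rw [hS, count_init]
  have hmem : ∀ p ∈ ((List.range isOpen.length).map
      (fun (c : Nat) => ((0 : Int), (c : Int)))).reverse, ∃ c : Nat, c < isOpen.length ∧ p = (0, (c : Int)) := by
    intro p hp
    rw [List.mem_reverse] at hp
    obtain ⟨c, hc, rfl⟩ := List.mem_map.mp hp
    exact ⟨c, List.mem_range.mp hc, rfl⟩
  constructor
  · exact flowLoop_shape isOpen _ _ _ (shape_init _)
  intro a b
  constructor
  · refine fun h => flowLoop_sound isOpen _ _ _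
      (fun x y hx => absurd hx (by simp [get_init])) ?_ a b h
    intro p hp hb ho
    obtain ⟨c, hc, rfl⟩ := hmem p hp
    exact Rch.top _ hb ho
  · intro h
    refine rch_subset isOpen _ ?_ ?_ a b h
    · exact flowLoop_closed isOpen _ _ _ hfuel (shape_init _)
        (fun x y hx => absurd hx (by simp [get_init]))
    · intro j hb ho
      have hj : ((j.toNat : Nat) : Int) = j := by
        obtain ⟨_, _, h3, _⟩ := hb
        omega
      have hpmem : ((0 : Int), ((j.toNat : Nat) : Int)) ∈ ((List.range isOpen.length).map
          (fun (c : Nat) => ((0 : Int), (c : Int)))).reverse := by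
        rw [List.mem_reverse]
        exact List.mem_map.mpr ⟨j.toNat, List.mem_range.mpr (by
          obtain ⟨_, _, h3, h4⟩ := hb
          omega), rfl⟩
      have := flowLoop_marks isOpen _ _ _ hfuel (shape_init _) _ hpmem
      simp only [hj] at this
      exact this hb ho

-- ---- pointwise equal shaped grids are equal ----
theorem grid_ext (n : Nat) (F G : List (List Bool)) (hF : Shape n F) (hG : Shape n G)
    (h : ∀ a b : Int, gridGet F a b = gridGet G a b) : F = G := by
  obtain ⟨hF1, hF2⟩ := hF
  obtain ⟨hG1, hG2⟩ := hG
  apply List.ext_getElem (by omega)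
  intro k hk hk'
  apply List.ext_getElem (by
    rw [hF2 _ (List.getElem_mem hk), hG2 _ (List.getElem_mem hk')])
  intro m hm hm'
  have := h (k : Int) (m : Int)
  unfold gridGet at this
  rw [if_pos ⟨Int.natCast_nonneg _, Int.natCast_nonneg _⟩] at this
  simp only [Int.toNat_natCast] at this
  rw [getD_eq_getElem' _ _ _ hk, getD_eq_getElem' _ _ _ hm,
    getD_eq_getElem' _ _ _ hk', getD_eq_getElem' _ _ _ hm'] at this
  exact this

-- ===== VERDICT =====
theorem flow_spec : Claim_equal_flow := by
  intro isOpen _ _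
  unfold Spec_flow
  obtain ⟨hAs, hA⟩ := flow_char isOpen
  obtain ⟨hBs, hB⟩ := flow_alt_char isOpen
  refine grid_ext isOpen.length _ _ hAs hBs ?_
  intro a b
  cases hx : gridGet (flow isOpen) a b
  · cases hy : gridGet (flow_alt isOpen) a b
    · rfl
    · exact absurd ((hA a b).mpr ((hB a b).mp hy)) (by simp [hx])
  · exact ((hB a b).mpr ((hA a b).mp hx)).symm
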